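-- pv_equiv track=rewrite | github.com/OlesyaSim/perf_lab | task1/task1.py | show_path
-- ===== SOURCE A (Python) =====
-- def show_path(n, m):
--     if n < 1:
--         return []
--     path = [1]
--     circular_array = list(range(1, n + 1))
--     current_index = 0
--     while True:
--         current_index = (current_index + m - 1) % n
--         if current_index == 0:
--             return path
--         else:
--             path.append(circular_array[current_index])
-- ===== SOURCE B (Python) =====
-- import math
--
--
-- def show_path(n, m):
--     if n < 1:
--         return []
--     steps = n // math.gcd(n, m - 1)
--     return [((i * (m - 1)) % n) + 1 for i in range(steps)]
-- ===== Notes on version B (the rewrite author's own statement) =====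
-- stated objective: faster
-- what changed: Replaces the iterate-until-index-returns-to-zero while-loop with list appends by a gcd-derived closed form for the cycle length plus direct indexed generation of the visited values in one list comprehension.
import Mathlib
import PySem

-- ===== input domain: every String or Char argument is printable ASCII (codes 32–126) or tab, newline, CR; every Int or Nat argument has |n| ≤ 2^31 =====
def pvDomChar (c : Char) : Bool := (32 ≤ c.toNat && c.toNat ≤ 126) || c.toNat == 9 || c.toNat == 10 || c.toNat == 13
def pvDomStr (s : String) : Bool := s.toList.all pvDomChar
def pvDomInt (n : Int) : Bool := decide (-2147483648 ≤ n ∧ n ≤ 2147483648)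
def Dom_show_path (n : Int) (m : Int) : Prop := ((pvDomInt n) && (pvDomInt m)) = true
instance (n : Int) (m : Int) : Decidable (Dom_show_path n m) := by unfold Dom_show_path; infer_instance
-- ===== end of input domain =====

-- B replaces A's iterate-until-back-at-zero loop by a gcd closed form for the
-- cycle length plus direct indexed generation (objective: faster, no array and
-- shorter loop; exact same return value).

-- ===== PORT A =====
-- the while-True loop; fuel bounds the iterations (the loop returns within n
-- steps, proved below), and pyGetD totalizes the in-range list indexing.
def showPathLoop (n m : Int) (arr : List Int) (fuel : Nat) (ci : Int) (path : List Int) : List Int :=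
  match fuel with
  | 0 => path
  | Nat.succ f =>
    let ci' := PySem.Int.mod (ci + m - 1) n
    if ci' = 0 then path
    else showPathLoop n m arr f ci' (path ++ [PySem.List.pyGetD arr ci' 0])

def show_path (n : Int) (m : Int) : List Int :=
  if n < 1 then []
  else showPathLoop n m (PySem.List.pyRange 1 (n + 1) 1) n.toNat 0 [1]

-- ===== PORT B =====
-- math.gcd is exactly Int.gcd (non-negative gcd of absolute values).
def show_path_alt (n : Int) (m : Int) : List Int :=
  if n < 1 then []
  else
    let steps := PySem.Int.floordiv n (Int.gcd n (m - 1))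
    (PySem.List.pyRange 0 steps 1).map (fun i => PySem.Int.mod (i * (m - 1)) n + 1)

-- ===== PRECONDITION & SPEC =====
def Spec_show_path (n : Int) (m : Int) (out : List Int) : Prop := out = show_path_alt n m
instance (n : Int) (m : Int) (out : List Int) : Decidable (Spec_show_path n m out) := by unfold Spec_show_path; infer_instance

-- ===== CLAIM (what is proved, stated in full; the proofs are below) =====
def Claim_equal_show_path : Prop := ∀ (n : Int) (m : Int), Dom_show_path n m → Spec_show_path n m (show_path n m)

-- ===== LEMMAS AND PROOFS =====

-- n ∣ k*d  ↔  n/gcd(n,d) ∣ k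
theorem dvd_mul_iff_div_gcd_dvd (n d k : Int) (hn : 0 < n) :
    n ∣ k * d ↔ (n / (Int.gcd n d : Int)) ∣ k := by
  set g : Int := (Int.gcd n d : Int) with hg
  have hgpos : 0 < g := by
    have hne : n ≠ 0 := by omega
    have h := Int.gcd_pos_of_ne_zero_left d hne
    rw [hg]; exact_mod_cast h
  have hgn : g ∣ n := Int.gcd_dvd_left n d
  have hgd : g ∣ d := Int.gcd_dvd_right n d
  obtain ⟨n', hn'⟩ := hgn
  obtain ⟨d', hd'⟩ := hgd
  have hgne : g ≠ 0 := by omega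
  have hdivn : n / g = n' := by rw [hn']; exact Int.mul_ediv_cancel_left n' hgne
  have hdivd : d / g = d' := by rw [hd']; exact Int.mul_ediv_cancel_left d' hgne
  have hcop : IsCoprime n' d' := by
    rw [Int.isCoprime_iff_gcd_eq_one, ← hdivn, ← hdivd]
    exact Int.gcd_div_gcd_div_gcd (i := n) (j := d) (h := by omega)
  rw [hdivn]
  constructor
  · intro h
    have h2 : g * n' ∣ g * (k * d') := by
      rw [hn'] at h; rw [hd'] at h
      calc g * n' ∣ k * (g * d') := h
        _ = g * (k * d') := by ring
    have h3 : n' ∣ k * d' := (mul_dvd_mul_iff_left hgne).mp h2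
    exact hcop.dvd_of_dvd_mul_right h3
  · intro h
    rw [hn', hd']
    obtain ⟨c, hc⟩ := h
    exact ⟨c * d', by rw [hc]; ring⟩

-- lookup in list(range(1, n+1)) at an in-range index i gives i + 1
theorem pyGetD_range_one (n i : Int) (h0 : 0 ≤ i) (hi : i < n) :
    PySem.List.pyGetD (PySem.List.pyRange 1 (n + 1) 1) i 0 = i + 1 := by
  have harr : PySem.List.pyRange 1 (n + 1) 1 = (PySem.List.pyRange 0 n 1).map (fun x => x + 1) := by
    rw [PySem.List.pyRange_one, PySem.List.pyRange_one, List.map_map]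
    have he : (n + 1 - 1) = n - 0 := by ring
    rw [he]
    apply List.map_congr_left
    intro k _
    simp
    ring
  rw [harr, PySem.List.pyGetD_map_pyRange_of_nonneg _ _ _ _ h0 hi]

-- the loop invariant: starting at step i (current index = (i*d) % n, path = the
-- first i+1 visited values), the loop finishes with the full s-element path
theorem loop_inv (n m : Int) (hn : 1 ≤ n) :
    ∀ (fuel i : Nat), i < (n / (Int.gcd n (m - 1) : Int)).toNat →
      (n / (Int.gcd n (m - 1) : Int)).toNat - i ≤ fuel →
      showPathLoop n m (PySem.List.pyRange 1 (n + 1) 1) fuel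
        (PySem.Int.mod ((i : Int) * (m - 1)) n)
        ((List.range (i + 1)).map (fun j : Nat => PySem.Int.mod ((j : Int) * (m - 1)) n + 1)) =
      (List.range (n / (Int.gcd n (m - 1) : Int)).toNat).map
        (fun j : Nat => PySem.Int.mod ((j : Int) * (m - 1)) n + 1) := by
  set s : Nat := (n / (Int.gcd n (m - 1) : Int)).toNat with hs
  intro fuel
  induction fuel with
  | zero => intro i h1 h2; omega
  | succ f ih =>
    intro i h1 h2
    have hnpos : (0 : Int) < n := by omega
    have hstep : PySem.Int.mod (PySem.Int.mod ((i : Int) * (m - 1)) n + m - 1) n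
        = PySem.Int.mod (((i : Int) + 1) * (m - 1)) n := by
      rw [PySem.Int.mod_eq_emod_of_pos hnpos, PySem.Int.mod_eq_emod_of_pos hnpos,
        PySem.Int.mod_eq_emod_of_pos hnpos,
        show (i : Int) * (m - 1) % n + m - 1 = (i : Int) * (m - 1) % n + (m - 1) from by ring,
        Int.emod_add_emod,
        show (i : Int) * (m - 1) + (m - 1) = ((i : Int) + 1) * (m - 1) from by ring]
    rw [showPathLoop]
    simp only [hstep]
    by_cases hlast : i + 1 = s
    · have hdvd : n ∣ ((i : Int) + 1) * (m - 1) := by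
        rw [dvd_mul_iff_div_gcd_dvd n (m - 1) _ hnpos]
        have : ((i : Int) + 1) = n / (Int.gcd n (m - 1) : Int) := by
          have hspos : (0 : Int) ≤ n / (Int.gcd n (m - 1) : Int) :=
            Int.ediv_nonneg (by omega) (by positivity)
          omega
        rw [this]
      have hz : PySem.Int.mod (((i : Int) + 1) * (m - 1)) n = 0 :=
        (PySem.Int.mod_eq_zero_iff_dvd _ _).mpr hdvd
      rw [if_pos hz, hlast]
    · have hlt : i + 1 < s := by omega
      have hnz : PySem.Int.mod (((i : Int) + 1) * (m - 1)) n ≠ 0 := by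
        intro hz
        have hdvd : n ∣ ((i : Int) + 1) * (m - 1) :=
          (PySem.Int.mod_eq_zero_iff_dvd _ _).mp hz
        rw [dvd_mul_iff_div_gcd_dvd n (m - 1) _ hnpos] at hdvd
        have hbound : ((i : Int) + 1) < n / (Int.gcd n (m - 1) : Int) := by
          have : ((i : Nat) + 1 : Int) < ((s : Nat) : Int) := by exact_mod_cast hlt
          have hspos : (0 : Int) ≤ n / (Int.gcd n (m - 1) : Int) :=
            Int.ediv_nonneg (by omega) (by positivity)
          omega
        have := Int.le_of_dvd (by omega) hdvd
        omega
      rw [if_neg hnz]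
      have hci0 : (0 : Int) ≤ PySem.Int.mod (((i : Int) + 1) * (m - 1)) n :=
        PySem.Int.mod_nonneg _ hnpos
      have hcin : PySem.Int.mod (((i : Int) + 1) * (m - 1)) n < n :=
        PySem.Int.mod_lt _ hnpos
      rw [pyGetD_range_one n _ hci0 hcin]
      have happ :
          ((List.range (i + 1)).map (fun j : Nat => PySem.Int.mod ((j : Int) * (m - 1)) n + 1))
            ++ [PySem.Int.mod (((i : Int) + 1) * (m - 1)) n + 1]
          = (List.range (i + 1 + 1)).map (fun j : Nat => PySem.Int.mod ((j : Int) * (m - 1)) n + 1) := by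
        rw [show List.range (i + 1 + 1) = List.range (i + 1) ++ [i + 1] from List.range_succ,
          List.map_append]
        simp only [List.map_cons, List.map_nil]
        push_cast
        rfl
      rw [happ]
      have := ih (i + 1) hlt (by omega)
      simpa using this

theorem show_path_eq (n m : Int) : show_path n m = show_path_alt n m := by
  by_cases hn : n < 1
  · simp [show_path, show_path_alt, hn]
  · have hnpos : (0 : Int) < n := by omega
    have hgpos : (0 : Int) < (Int.gcd n (m - 1) : Int) := by
      have : n ≠ 0 := by omega
      exact_mod_cast Int.gcd_pos_of_ne_zero_left (m - 1) this
    set s : Nat := (n / (Int.gcd n (m - 1) : Int)).toNat with hs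
    have hsdvd : (Int.gcd n (m - 1) : Int) ∣ n := Int.gcd_dvd_left n (m - 1)
    have hspos : 1 ≤ s := by
      have h1 : (Int.gcd n (m - 1) : Int) ≤ n := Int.le_of_dvd hnpos hsdvd
      have h2 : 1 ≤ n / (Int.gcd n (m - 1) : Int) := Int.le_ediv_iff_mul_le hgpos |>.mpr (by omega)
      omega
    have hsn : s ≤ n.toNat := by
      have := Int.ediv_le_self (Int.gcd n (m - 1) : Int) (le_of_lt hnpos)
      omega
    have hA : show_path n m = (List.range s).map
        (fun j : Nat => PySem.Int.mod ((j : Int) * (m - 1)) n + 1) := by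
      rw [show_path, if_neg hn]
      have h0 : PySem.Int.mod ((0 : Int) * (m - 1)) n = 0 := by
        rw [PySem.Int.mod_eq_emod_of_pos hnpos]; simp
      have hinit : ([1] : List Int) = (List.range (0 + 1)).map
          (fun j : Nat => PySem.Int.mod ((j : Int) * (m - 1)) n + 1) := by
        simp [List.range_succ]
        rw [PySem.Int.mod_eq_emod_of_pos hnpos]
        simp
      calc showPathLoop n m (PySem.List.pyRange 1 (n + 1) 1) n.toNat 0 [1]
          = showPathLoop n m (PySem.List.pyRange 1 (n + 1) 1) n.toNat
              (PySem.Int.mod ((0 : Int) * (m - 1)) n)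
              ((List.range (0 + 1)).map (fun j : Nat => PySem.Int.mod ((j : Int) * (m - 1)) n + 1)) := by
            rw [h0, ← hinit]
        _ = (List.range s).map (fun j : Nat => PySem.Int.mod ((j : Int) * (m - 1)) n + 1) :=
            loop_inv n m (by omega) n.toNat 0 (by omega) (by omega)
    have hB : show_path_alt n m = (List.range s).map
        (fun j : Nat => PySem.Int.mod ((j : Int) * (m - 1)) n + 1) := by
      rw [show_path_alt, if_neg hn]
      have hfd : PySem.Int.floordiv n (Int.gcd n (m - 1) : Int) = (s : Int) := by
        rw [PySem.Int.floordiv_eq_ediv_of_pos hgpos]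
        have : (0 : Int) ≤ n / (Int.gcd n (m - 1) : Int) := Int.ediv_nonneg (by omega) (by omega)
        omega
      simp only [hfd]
      rw [show (∀ k : Nat, PySem.List.pyRange 0 (k : Int) 1 = (List.range k).map (fun j : Nat => (j : Int)))
        from fun k => by rw [PySem.List.pyRange_one]; simp, List.map_map]
      rfl
    rw [hA, hB]

-- ===== VERDICT (by name: the statement is the Claim_ definition above) =====
theorem show_path_spec : Claim_equal_show_path := by
  intro n m _
  unfold Spec_show_path
  exact show_path_eq n m
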